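-- pv_equiv track=rewrite | github.com/shreydesai/cups | utils.py | limit_doc
-- ===== SOURCE A (Python) =====
-- def limit_doc(doc_list, limit=512):
--     index = 0
--     n_tokens = 0
--     for sent in doc_list:
--         index += 1
--         n_tokens += len(sent)
--         if n_tokens > limit:
--             break
--     return doc_list[:index]
-- ===== SOURCE B (Python) =====
-- def limit_doc(doc_list, limit=512):
--     # Stage 1: table of cumulative token counts; prefix[i] = tokens in first i sentences.
--     prefix = [0]
--     total = 0
--     for sent in doc_list:
--         total += len(sent)
--         prefix.append(total)
--     # Stage 2: binary search (bisect_right by hand; prefix is nondecreasing since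
--     # sentence lengths are >= 0) for the first cumulative count exceeding limit.
--     lo, hi = 0, len(prefix)
--     while lo < hi:
--         mid = (lo + hi) // 2
--         if prefix[mid] <= limit:
--             lo = mid + 1
--         else:
--             hi = mid
--     # lo = index of first prefix value > limit; include that sentence, cap at len.
--     return doc_list[:min(max(lo, 1), len(doc_list))]
-- ===== Notes on version B (the rewrite author's own statement) =====
-- stated objective: alternative
-- what changed: Replaces A's single accumulate-and-break loop by two stages: build the full cumulative-length table prefix[0..n], then binary-search (hand-written bisect_right) that sorted table for the first entry exceeding limit, and slice once at min(max(lo,1),n).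
import Mathlib
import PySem

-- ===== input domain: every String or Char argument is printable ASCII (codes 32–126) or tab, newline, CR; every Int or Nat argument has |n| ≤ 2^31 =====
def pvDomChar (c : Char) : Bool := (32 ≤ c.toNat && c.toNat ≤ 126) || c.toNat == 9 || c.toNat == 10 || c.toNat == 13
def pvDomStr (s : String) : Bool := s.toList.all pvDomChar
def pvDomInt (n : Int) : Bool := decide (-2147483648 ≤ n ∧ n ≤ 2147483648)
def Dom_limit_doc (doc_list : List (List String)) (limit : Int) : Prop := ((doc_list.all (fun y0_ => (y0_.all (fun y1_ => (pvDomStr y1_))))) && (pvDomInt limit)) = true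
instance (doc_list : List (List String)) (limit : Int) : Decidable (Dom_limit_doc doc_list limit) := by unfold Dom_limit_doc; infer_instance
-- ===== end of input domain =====

-- B replaces A's single accumulate-and-break loop by two stages: build the full
-- cumulative-length table, then binary-search it for the first entry over the limit
-- (alternative algorithm, same asymptotic cost).

-- ===== PORT A =====
-- A's for-loop with break: structural recursion over doc_list carrying (index, n_tokens).
def limitLoopA : List (List String) → Int → Int → Int → Int
  | [], index, _, _ => index
  | sent :: rest, index, nTokens, limit =>
    let index' := index + 1
    let nTokens' := nTokens + (sent.length : Int)
    if nTokens' > limit then index' else limitLoopA rest index' nTokens' limit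

def limit_doc (doc_list : List (List String)) (limit : Int) : List (List String) :=
  PySem.List.slice doc_list none (some (limitLoopA doc_list 0 0 limit))

-- ===== PORT B =====
-- Stage-1 loop of Source B (append cumulative totals) as structural recursion carrying `total`;
-- the produced list is prefix[1:], the leading 0 is consed on at the call site.
def buildPrefix : List (List String) → Int → List Int
  | [], _ => []
  | sent :: rest, total => (total + (sent.length : Int)) :: buildPrefix rest (total + (sent.length : Int))

-- Source B's while-loop: hand-written bisect_right. `prefix[mid]` is ported with pyGetD;
-- mid is always in range on the loop's reachable states, so the default is never taken.
def bsearch (pre : List Int) (limit lo hi : Int) : Int :=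
  if h : lo < hi then
    let mid := PySem.Int.floordiv (lo + hi) 2
    if PySem.List.pyGetD pre mid 0 ≤ limit then bsearch pre limit (mid + 1) hi
    else bsearch pre limit lo mid
  else lo
termination_by (hi - lo).toNat
decreasing_by
  all_goals
    simp only [PySem.Int.floordiv_eq_ediv_of_pos (by omega : (0:Int) < 2)]
    omega

def limit_doc_alt (doc_list : List (List String)) (limit : Int) : List (List String) :=
  let pre := (0 : Int) :: buildPrefix doc_list 0
  let lo := bsearch pre limit 0 (PySem.List.len pre)
  PySem.List.slice doc_list none (some (min (max lo 1) (PySem.List.len doc_list)))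

-- ===== PRECONDITION & SPEC =====
def Spec_limit_doc (doc_list : List (List String)) (limit : Int) (out : List (List String)) : Prop := out = limit_doc_alt doc_list limit
instance (doc_list : List (List String)) (limit : Int) (out : List (List String)) : Decidable (Spec_limit_doc doc_list limit out) := by unfold Spec_limit_doc; infer_instance

-- ===== CLAIM (what is proved, stated in full; the proofs are below) =====
def Claim_equal_limit_doc : Prop := ∀ (doc_list : List (List String)) (limit : Int), Dom_limit_doc doc_list limit → Spec_limit_doc doc_list limit (limit_doc doc_list limit)

-- ===== LEMMAS AND PROOFS =====

-- A's loop with both accumulators reset: remaining budget l = limit - n_tokens.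
def idxA : List (List String) → Int → Int
  | [], _ => 0
  | sent :: rest, l =>
    if (sent.length : Int) > l then 1 else 1 + idxA rest (l - sent.length)

-- Number of prefix sums of sentence lengths that stay within budget l.
def cntB : List (List String) → Int → Int
  | [], _ => 0
  | sent :: rest, l =>
    (if (sent.length : Int) ≤ l then 1 else 0) + cntB rest (l - sent.length)

theorem limitLoopA_eq_idxA (dl : List (List String)) (i n limit : Int) :
    limitLoopA dl i n limit = i + idxA dl (limit - n) := by
  induction dl generalizing i n with
  | nil => simp [limitLoopA, idxA]
  | cons s rest ih =>
    simp only [limitLoopA, idxA]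
    by_cases h : n + (s.length : Int) > limit
    · rw [if_pos h, if_pos (by omega)]
    · rw [if_neg h, if_neg (by omega), ih]
      have : limit - (n + (s.length : Int)) = limit - n - (s.length : Int) := by ring
      rw [this]; ring

theorem cntB_nonneg (dl : List (List String)) (l : Int) : 0 ≤ cntB dl l := by
  induction dl generalizing l with
  | nil => simp [cntB]
  | cons s rest ih =>
    simp only [cntB]
    have := ih (l - (s.length : Int))
    split_ifs <;> omega

theorem cntB_le_len (dl : List (List String)) (l : Int) : cntB dl l ≤ (dl.length : Int) := by
  induction dl generalizing l with
  | nil => simp [cntB]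
  | cons s rest ih =>
    simp only [cntB, List.length_cons]
    have := ih (l - (s.length : Int))
    push_cast
    split_ifs <;> omega

theorem cntB_neg (dl : List (List String)) (l : Int) (hl : l < 0) : cntB dl l = 0 := by
  induction dl generalizing l with
  | nil => rfl
  | cons s rest ih =>
    have hs : (0 : Int) ≤ (s.length : Int) := Int.natCast_nonneg _
    simp only [cntB]
    rw [if_neg (by omega), ih _ (by omega)]
    omega

theorem idxA_eq_min (dl : List (List String)) (l : Int) :
    idxA dl l = min (cntB dl l + 1) (dl.length : Int) := by
  induction dl generalizing l with
  | nil => simp [idxA, cntB]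
  | cons s rest ih =>
    simp only [idxA, cntB, List.length_cons]
    by_cases h : (s.length : Int) > l
    · rw [if_pos h, if_neg (by omega), cntB_neg rest _ (by omega)]
      have h0 : (0 : Int) ≤ (rest.length : Int) := Int.natCast_nonneg _
      omega
    · rw [if_neg h, if_pos (by omega), ih]
      push_cast
      omega

-- Every entry of buildPrefix dl t is at least t (sentence lengths are ≥ 0).
theorem buildPrefix_ge (dl : List (List String)) (t : Int) :
    ∀ x ∈ buildPrefix dl t, t ≤ x := by
  induction dl generalizing t with
  | nil => simp [buildPrefix]
  | cons s rest ih =>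
    intro x hx
    simp only [buildPrefix, List.mem_cons] at hx
    have hs : (0 : Int) ≤ (s.length : Int) := Int.natCast_nonneg _
    rcases hx with h | h
    · omega
    · have := ih (t + (s.length : Int)) x h; omega

theorem buildPrefix_length (dl : List (List String)) (t : Int) :
    (buildPrefix dl t).length = dl.length := by
  induction dl generalizing t with
  | nil => rfl
  | cons s rest ih => simp [buildPrefix, ih]

theorem buildPrefix_pairwise (dl : List (List String)) (t : Int) :
    (buildPrefix dl t).Pairwise (· ≤ ·) := by
  induction dl generalizing t with
  | nil => simp [buildPrefix]
  | cons s rest ih =>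
    simp only [buildPrefix, List.pairwise_cons]
    exact ⟨fun y hy => buildPrefix_ge rest _ y hy, ih _⟩

theorem prefixP_pairwise (dl : List (List String)) :
    ((0 : Int) :: buildPrefix dl 0).Pairwise (· ≤ ·) := by
  simp only [List.pairwise_cons]
  exact ⟨fun y hy => buildPrefix_ge dl 0 y hy, buildPrefix_pairwise dl 0⟩

-- The split-point characterisation of cntB on the table buildPrefix dl t.
theorem buildPrefix_split (dl : List (List String)) (t limit : Int) :
    (∀ (j : Nat) (hj : j < (buildPrefix dl t).length), (j : Int) < cntB dl (limit - t) →
        (buildPrefix dl t)[j] ≤ limit) ∧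
    (∀ (j : Nat) (hj : j < (buildPrefix dl t).length), cntB dl (limit - t) ≤ (j : Int) →
        limit < (buildPrefix dl t)[j]) := by
  induction dl generalizing t with
  | nil => simp [buildPrefix]
  | cons s rest ih =>
    have hs : (0 : Int) ≤ (s.length : Int) := Int.natCast_nonneg _
    by_cases h : (s.length : Int) ≤ limit - t
    · -- first sentence still fits: cntB = 1 + cntB rest …
      have hc : cntB (s :: rest) (limit - t) = 1 + cntB rest (limit - t - s.length) := by
        simp only [cntB, if_pos h]
      have harg : limit - t - (s.length : Int) = limit - (t + (s.length : Int)) := by ring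
      obtain ⟨ih1, ih2⟩ := ih (t + (s.length : Int))
      constructor
      · intro j hj hlt
        match j with
        | 0 => simpa [buildPrefix] using (by omega : t + (s.length : Int) ≤ limit)
        | (j' + 1) =>
          simp only [buildPrefix, List.getElem_cons_succ]
          exact ih1 j' (by simpa [buildPrefix] using hj) (by rw [← harg]; rw [hc] at hlt; push_cast at hlt ⊢; omega)
      · intro j hj hge
        have hc' := cntB_nonneg rest (limit - t - s.length)
        match j with
        | 0 => exfalso; rw [hc] at hge; push_cast at hge; omega
        | (j' + 1) =>
          simp only [buildPrefix, List.getElem_cons_succ]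
          exact ih2 j' (by simpa [buildPrefix] using hj) (by rw [← harg]; rw [hc] at hge; push_cast at hge ⊢; omega)
    · -- first sentence already overflows: cntB = 0, every entry exceeds limit
      have hc : cntB (s :: rest) (limit - t) = 0 := by
        simp only [cntB, if_neg h]
        rw [cntB_neg rest _ (by omega)]
        norm_num
      constructor
      · intro j hj hlt; rw [hc] at hlt; omega
      · intro j hj _
        match j with
        | 0 => simpa [buildPrefix] using (by omega : limit < t + (s.length : Int))
        | (j' + 1) =>
          have hj' : j' < (buildPrefix rest (t + (s.length : Int))).length := by
            simpa [buildPrefix] using hj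
          simp only [buildPrefix, List.getElem_cons_succ]
          have := buildPrefix_ge rest (t + (s.length : Int)) _ (List.getElem_mem hj')
          omega

-- The binary search returns a split point of the (nondecreasing) table.
theorem bsearch_spec (P : List Int) (limit : Int)
    (hm : ∀ (i j : Nat) (hi : i < P.length) (hj : j < P.length), i ≤ j → P[i] ≤ P[j]) :
    ∀ (fuel : Nat) (lo hi : Int), (hi - lo).toNat ≤ fuel →
    0 ≤ lo → lo ≤ hi → hi ≤ (P.length : Int) →
    (∀ (j : Nat) (hj : j < P.length), (j : Int) < lo → P[j] ≤ limit) →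
    (∀ (j : Nat) (hj : j < P.length), hi ≤ (j : Int) → limit < P[j]) →
    0 ≤ bsearch P limit lo hi ∧ bsearch P limit lo hi ≤ (P.length : Int) ∧
    (∀ (j : Nat) (hj : j < P.length), (j : Int) < bsearch P limit lo hi → P[j] ≤ limit) ∧
    (∀ (j : Nat) (hj : j < P.length), bsearch P limit lo hi ≤ (j : Int) → limit < P[j]) := by
  intro fuel
  induction fuel with
  | zero =>
    intro lo hi hfuel h0 hlh hhl H1 H2
    have : ¬ lo < hi := by omega
    rw [bsearch, dif_neg this]
    exact ⟨h0, by omega, fun j hj hjlt => H1 j hj hjlt, fun j hj hjge => H2 j hj (by omega)⟩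
  | succ n ih =>
    intro lo hi hfuel h0 hlh hhl H1 H2
    by_cases h : lo < hi
    · rw [bsearch, dif_pos h]
      have hmid : lo ≤ PySem.Int.floordiv (lo + hi) 2 ∧ PySem.Int.floordiv (lo + hi) 2 < hi := by
        simp only [PySem.Int.floordiv_eq_ediv_of_pos (by omega : (0:Int) < 2)]
        omega
      set mid := PySem.Int.floordiv (lo + hi) 2 with hmiddef
      have hmr : 0 ≤ mid ∧ mid < (P.length : Int) := ⟨by omega, by omega⟩
      have hget : PySem.List.pyGetD P mid 0 = P[mid.toNat]'(by omega) :=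
        PySem.List.pyGetD_eq_getElem P 0 hmr.1 hmr.2
      by_cases hle : PySem.List.pyGetD P mid 0 ≤ limit
      · rw [if_pos hle]
        refine ih (mid + 1) hi (by omega) (by omega) (by omega) hhl ?_ H2
        intro j hj hjlt
        by_cases hjlo : (j : Int) < lo
        · exact H1 j hj hjlo
        · have hjm : j ≤ mid.toNat := by omega
          have := hm j mid.toNat hj (by omega) hjm
          rw [hget] at hle; omega
      · rw [if_neg hle]
        refine ih lo mid (by omega) (by omega) (by omega) (by omega) H1 ?_
        intro j hj hjge
        by_cases hjhi : hi ≤ (j : Int)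
        · exact H2 j hj hjhi
        · have := hm mid.toNat j (by omega) hj (by omega)
          rw [hget] at hle; omega
    · rw [bsearch, dif_neg h]
      exact ⟨h0, by omega, fun j hj hjlt => H1 j hj hjlt, fun j hj hjge => H2 j hj (by omega)⟩

-- A split point of a list is unique.
theorem split_unique (P : List Int) (limit r1 r2 : Int)
    (h1a : 0 ≤ r1) (h1b : r1 ≤ (P.length : Int))
    (h1c : ∀ (j : Nat) (hj : j < P.length), (j : Int) < r1 → P[j] ≤ limit)
    (h1d : ∀ (j : Nat) (hj : j < P.length), r1 ≤ (j : Int) → limit < P[j])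
    (h2a : 0 ≤ r2) (h2b : r2 ≤ (P.length : Int))
    (h2c : ∀ (j : Nat) (hj : j < P.length), (j : Int) < r2 → P[j] ≤ limit)
    (h2d : ∀ (j : Nat) (hj : j < P.length), r2 ≤ (j : Int) → limit < P[j]) : r1 = r2 := by
  by_contra hne
  rcases lt_or_gt_of_ne hne with hlt | hlt
  · have hj : r1.toNat < P.length := by omega
    have := h1d r1.toNat hj (by omega)
    have := h2c r1.toNat hj (by omega)
    omega
  · have hj : r2.toNat < P.length := by omega
    have := h2d r2.toNat hj (by omega)
    have := h1c r2.toNat hj (by omega)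
    omega

-- The explicit split point of 0 :: buildPrefix dl 0.
theorem bsearch_value (dl : List (List String)) (limit : Int) :
    bsearch ((0 : Int) :: buildPrefix dl 0) limit 0 (PySem.List.len ((0 : Int) :: buildPrefix dl 0))
      = (if limit < 0 then 0 else cntB dl limit + 1) := by
  set P := (0 : Int) :: buildPrefix dl 0 with hP
  have hm : ∀ (i j : Nat) (hi : i < P.length) (hj : j < P.length), i ≤ j → P[i] ≤ P[j] := by
    intro i j hi hj hij
    rcases Nat.eq_or_lt_of_le hij with rfl | hlt
    · exact le_refl _
    · exact (List.pairwise_iff_getElem.mp (prefixP_pairwise dl)) i j hi hj hlt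
  have hlen : PySem.List.len P = (P.length : Int) := by simp [PySem.List.len_eq]
  have hspec := bsearch_spec P limit hm ((P.length : Int) - 0).toNat 0 (P.length : Int)
    (le_refl _) (le_refl _) (Int.natCast_nonneg _) (le_refl _)
    (by intro j hj hjlt; omega)
    (by intro j hj hjge; exfalso; omega)
  rw [hlen]
  obtain ⟨ha, hb, hc, hd⟩ := hspec
  obtain ⟨s1, s2⟩ := buildPrefix_split dl 0 limit
  refine split_unique P limit _ _ ha hb hc hd ?_ ?_ ?_ ?_
  · split_ifs with h
    · omega
    · have := cntB_nonneg dl limit; omega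
  · have := cntB_nonneg dl limit
    have hcle := cntB_le_len dl limit
    split_ifs with h
    · simp [hP]; omega
    · simp only [hP, List.length_cons, buildPrefix_length]; push_cast; omega
  · intro j hj hjlt
    split_ifs at hjlt with h
    · omega
    · match j with
      | 0 => simpa [hP] using (by omega : (0:Int) ≤ limit)
      | (j' + 1) =>
        simp only [hP, List.getElem_cons_succ]
        have := s1 j' (by simpa [hP] using hj)
        simp only [Int.sub_zero] at this
        exact this (by push_cast at hjlt ⊢; omega)
  · intro j hj hjge
    split_ifs at hjge with h
    · match j with
      | 0 => simpa [hP] using h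
      | (j' + 1) =>
        simp only [hP, List.getElem_cons_succ]
        have := s2 j' (by simpa [hP] using hj)
        simp only [Int.sub_zero] at this
        exact this (by have := cntB_nonneg dl limit; rw [cntB_neg dl limit h]; omega)
    · match j with
      | 0 => exfalso; have := cntB_nonneg dl limit; push_cast at hjge; omega
      | (j' + 1) =>
        simp only [hP, List.getElem_cons_succ]
        have := s2 j' (by simpa [hP] using hj)
        simp only [Int.sub_zero] at this
        exact this (by push_cast at hjge ⊢; omega)

-- ===== VERDICT (by name: the statement is the Claim_ definition above) =====
theorem limit_doc_spec : Claim_equal_limit_doc := by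
  intro dl limit _
  show limit_doc dl limit = limit_doc_alt dl limit
  unfold limit_doc limit_doc_alt
  rw [limitLoopA_eq_idxA]
  simp only [Int.sub_zero, Int.zero_add, bsearch_value, idxA_eq_min]
  have hc0 := cntB_nonneg dl limit
  have hlen : PySem.List.len dl = (dl.length : Int) := by simp [PySem.List.len_eq]
  rw [hlen]
  congr 2
  split_ifs with h
  · rw [cntB_neg dl limit h]
    omega
  · omega
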